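-- pv_equiv track=rewrite | github.com/MichaelTroelsen/SIDDetector-II | scripts/midi_debug.py | dec_row
-- ===== SOURCE A (Python) =====
-- def dec_row(b):
--     out = []
--     for c in b:
--         if c in (0x20, 0x00):
--             out.append(" ")
--         elif 0x01 <= c <= 0x1A:
--             out.append(chr(ord("A") + c - 1))
--         elif 0x30 <= c <= 0x39:
--             out.append(chr(c))
--         elif c == 0x2E:
--             out.append(".")
--         elif c == 0x3A:
--             out.append(":")
--         else:
--             out.append(".")
--     return "".join(out).rstrip()
-- ===== SOURCE B (Python) =====
-- _CHARS = " ABCDEFGHIJKLMNOPQRSTUVWXYZ"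
--
--
-- def dec_row(b):
--     # Walk the row from the RIGHT, skipping trailing blank bytes (0x00/0x20)
--     # before anything has been emitted, so no rstrip pass is needed; decode
--     # letters (and 0x00/0x20 via index 0/the 0x20 branch) by indexing a
--     # literal alphabet string, digits and ':' directly via chr (0x30..0x3A).
--     out = []
--     for c in reversed(b):
--         if not out and c in (0x00, 0x20):
--             continue
--         if 0 <= c <= 26:
--             out.append(_CHARS[c])
--         elif 0x30 <= c <= 0x3A:
--             out.append(chr(c))
--         elif c == 0x20:
--             out.append(" ")
--         else:
--             out.append(".")
--     return "".join(reversed(out))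
-- ===== Notes on version B (the rewrite author's own statement) =====
-- stated objective: alternative
-- what changed: B traverses the row from the right with the trailing-blank trim fused into the pass (skip 0x00/0x20 while nothing has been emitted, so no rstrip), and decodes by indexing a literal alphabet string for 0..26 and a single merged chr branch for 0x30..0x3A, instead of A's left-to-right decode-all pass followed by rstrip.
import Mathlib
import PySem

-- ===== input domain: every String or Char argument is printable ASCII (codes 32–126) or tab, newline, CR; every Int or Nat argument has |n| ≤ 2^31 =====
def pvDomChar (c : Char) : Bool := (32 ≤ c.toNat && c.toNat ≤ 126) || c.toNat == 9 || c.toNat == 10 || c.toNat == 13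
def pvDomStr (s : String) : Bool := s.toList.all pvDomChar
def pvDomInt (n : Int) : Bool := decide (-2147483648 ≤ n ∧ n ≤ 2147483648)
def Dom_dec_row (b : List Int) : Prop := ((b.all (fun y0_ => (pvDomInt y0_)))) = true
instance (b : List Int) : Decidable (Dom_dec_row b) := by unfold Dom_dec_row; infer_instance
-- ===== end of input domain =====

-- B walks the row from the right, fusing the trailing-blank trim into the pass (no rstrip)
-- and decoding 0..26 by indexing an alphabet string, instead of A's left-to-right
-- decode-everything pass followed by rstrip (objective: alternative; same return value).

-- ===== PORT A =====
def dec_row (b : List Int) : String :=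
  let out := b.foldl (fun out c =>
    if c = 32 ∨ c = 0 then out ++ [" "]
    else if 1 ≤ c ∧ c ≤ 26 then out ++ [String.ofList [Char.ofNat (65 + c - 1).toNat]]
    else if 48 ≤ c ∧ c ≤ 57 then out ++ [String.ofList [Char.ofNat c.toNat]]
    else if c = 46 then out ++ ["."]
    else if c = 58 then out ++ [":"]
    else out ++ ["."]) []
  PySem.Str.rstrip (PySem.Str.join "" out)

-- ===== PORT B =====
-- the module-level literal _CHARS = " ABCDEFGHIJKLMNOPQRSTUVWXYZ"
def pvChars_dec_row : List Char := " ABCDEFGHIJKLMNOPQRSTUVWXYZ".toList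

-- 'for c in reversed(b): …' appending per-branch, then '"".join(reversed(out))';
-- _CHARS[c] is guarded by 0 <= c <= 26, so the index is always in range (getD never fires)
def dec_row_alt (b : List Int) : String :=
  let out := b.reverse.foldl (fun out c =>
    if out = [] ∧ (c = 0 ∨ c = 32) then out
    else if 0 ≤ c ∧ c ≤ 26 then out ++ [(PySem.List.pyGet? pvChars_dec_row c).getD '.']
    else if 48 ≤ c ∧ c ≤ 58 then out ++ [Char.ofNat c.toNat]
    else if c = 32 then out ++ [' ']
    else out ++ ['.']) []
  String.ofList out.reverse

-- ===== PRECONDITION & SPEC =====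
def Spec_dec_row (b : List Int) (out : String) : Prop := out = dec_row_alt b
instance (b : List Int) (out : String) : Decidable (Spec_dec_row b out) := by unfold Spec_dec_row; infer_instance

-- ===== CLAIM (what is proved, stated in full; the proofs are below) =====
def Claim_equal_dec_row : Prop := ∀ (b : List Int), Dom_dec_row b → Spec_dec_row b (dec_row b)

-- ===== LEMMAS AND PROOFS =====

-- the shared per-byte character classification (proof-only; neither port uses it)
def pvCls (c : Int) : Char :=
  if c = 32 ∨ c = 0 then ' '
  else if 1 ≤ c ∧ c ≤ 26 then Char.ofNat (65 + c - 1).toNat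
  else if 48 ≤ c ∧ c ≤ 57 then Char.ofNat c.toNat
  else if c = 46 then '.'
  else if c = 58 then ':'
  else '.'

def pvBlank (c : Int) : Bool := decide (c = 0 ∨ c = 32)

def pvStepB (out : List Char) (c : Int) : List Char :=
  if out = [] ∧ (c = 0 ∨ c = 32) then out
  else if 0 ≤ c ∧ c ≤ 26 then out ++ [(PySem.List.pyGet? pvChars_dec_row c).getD '.']
  else if 48 ≤ c ∧ c ≤ 58 then out ++ [Char.ofNat c.toNat]
  else if c = 32 then out ++ [' ']
  else out ++ ['.']

lemma pvA_step_eq : (fun (out : List String) (c : Int) =>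
    if c = 32 ∨ c = 0 then out ++ [" "]
    else if 1 ≤ c ∧ c ≤ 26 then out ++ [String.ofList [Char.ofNat (65 + c - 1).toNat]]
    else if 48 ≤ c ∧ c ≤ 57 then out ++ [String.ofList [Char.ofNat c.toNat]]
    else if c = 46 then out ++ ["."]
    else if c = 58 then out ++ [":"]
    else out ++ ["."]) = fun out c => out ++ [String.ofList [pvCls c]] := by
  funext out c
  unfold pvCls
  split_ifs <;> rfl

-- B's decode agrees with the shared classification on every byte
lemma pvDecB_eq (c : Int) :
    (if 0 ≤ c ∧ c ≤ 26 then (PySem.List.pyGet? pvChars_dec_row c).getD '.'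
     else if 48 ≤ c ∧ c ≤ 58 then Char.ofNat c.toNat
     else if c = 32 then ' ' else '.') = pvCls c := by
  by_cases h1 : 0 ≤ c ∧ c ≤ 26
  · rw [if_pos h1]
    obtain ⟨ha, hb⟩ := h1
    interval_cases c <;> decide
  · rw [if_neg h1]
    by_cases h2 : 48 ≤ c ∧ c ≤ 58
    · rw [if_pos h2]
      unfold pvCls
      rw [if_neg (by omega), if_neg (by omega)]
      by_cases h3 : 48 ≤ c ∧ c ≤ 57
      · rw [if_pos h3]
      · rw [if_neg h3, if_neg (by omega)]
        have hc : c = 58 := by omega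
        subst hc
        rw [if_pos rfl]
        decide
    · rw [if_neg h2]
      by_cases h4 : c = 32
      · subst h4
        rw [if_pos rfl]
        unfold pvCls
        rw [if_pos (Or.inl rfl)]
      · rw [if_neg h4]
        unfold pvCls
        rw [if_neg (by omega), if_neg (by omega), if_neg (by omega)]
        by_cases h5 : c = 46
        · rw [if_pos h5]
        · rw [if_neg h5, if_neg (by omega)]

-- outside the skip branch, B's step appends the classified byte
lemma pvStepB_eq (out : List Char) (c : Int) (h : ¬(out = [] ∧ (c = 0 ∨ c = 32))) :
    pvStepB out c = out ++ [pvCls c] := by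
  unfold pvStepB
  rw [if_neg h, ← pvDecB_eq]
  split_ifs <;> rfl

lemma pvValid (n : Nat) (h : n ≤ 126) : n.isValidChar := by
  simp only [Nat.isValidChar]
  omega

lemma pvIsspace_ofNat (n : Nat) (h1 : 33 ≤ n) (h2 : n ≤ 126) :
    PySem.Chars.isspace (Char.ofNat n) = false := by
  have hn : (Char.ofNat n).toNat = n := by
    rw [Char.toNat_ofNat, if_pos (pvValid _ h2)]
  simp only [PySem.Chars.isspace, hn, Bool.or_eq_false_iff, Bool.and_eq_false_iff,
    decide_eq_false_iff_not]
  omega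

lemma pvIsspace_pvCls (c : Int) :
    PySem.Chars.isspace (pvCls c) = pvBlank c := by
  unfold pvBlank pvCls
  split_ifs with h1 h2 h3 h4 h5
  · have hc : c = 0 ∨ c = 32 := by omega
    simp [PySem.Chars.isspace, hc]
  · have hc : ¬(c = 0 ∨ c = 32) := by omega
    rw [pvIsspace_ofNat _ (by omega) (by omega)]
    simp [hc]
  · have hc : ¬(c = 0 ∨ c = 32) := by omega
    rw [pvIsspace_ofNat _ (by omega) (by omega)]
    simp [hc]
  · have hc : ¬(c = 0 ∨ c = 32) := by omega
    simp [PySem.Chars.isspace, hc]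
  · have hc : ¬(c = 0 ∨ c = 32) := by omega
    simp [PySem.Chars.isspace, hc]
  · have hc : ¬(c = 0 ∨ c = 32) := by omega
    simp [PySem.Chars.isspace, hc]

-- fold with nonempty accumulator just appends decoded bytes
lemma pvFoldB_nonempty (l : List Int) : ∀ out, out ≠ [] →
    l.foldl pvStepB out = out ++ l.map pvCls := by
  induction l with
  | nil => intro out _; simp
  | cons c t ih =>
    intro out h
    rw [List.foldl_cons, pvStepB_eq out c (by simp [h]), ih _ (by simp)]
    simp

-- the whole fold = decode of the input with leading (= original trailing) blanks dropped
lemma pvFoldB_eq (l : List Int) :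
    l.foldl pvStepB [] = (l.dropWhile pvBlank).map pvCls := by
  induction l with
  | nil => rfl
  | cons c t ih =>
    rw [List.foldl_cons, List.dropWhile_cons]
    by_cases hb : pvBlank c = true
    · have hb' : c = 0 ∨ c = 32 := by simpa [pvBlank] using hb
      rw [if_pos hb]
      have h0 : pvStepB [] c = [] := by unfold pvStepB; rw [if_pos ⟨rfl, hb'⟩]
      rw [h0, ih]
    · have hb' : ¬(c = 0 ∨ c = 32) := by simpa [pvBlank] using hb
      rw [if_neg hb]
      rw [pvStepB_eq [] c (by simp [hb']), List.nil_append,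
        pvFoldB_nonempty t _ (by simp)]
      simp

lemma pvIntercalate_nil : ∀ (xss : List (List Char)),
    List.intercalate ([] : List Char) xss = xss.flatten
  | [] => rfl
  | [_] => by simp [List.intercalate]
  | a :: b :: t => by
    have := pvIntercalate_nil (b :: t)
    simp only [List.intercalate] at this ⊢
    simp [List.intersperse_cons₂, this]

lemma pvJoin_singletons (l : List Int) (f : Int → Char) :
    (PySem.Str.join "" (l.map (fun c => String.ofList [f c]))).toList = l.map f := by
  rw [PySem.Str.toList_join]
  show PySem.Chars.join [] _ = _
  unfold PySem.Chars.join
  rw [pvIntercalate_nil]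
  induction l with
  | nil => rfl
  | cons x xs ih => simp_all

-- ===== VERDICT (by name: the statement is the Claim_ definition above) =====
theorem dec_row_spec : Claim_equal_dec_row := by
  intro b _
  unfold Spec_dec_row dec_row dec_row_alt
  rw [← String.toList_inj]
  simp only [pvA_step_eq]
  rw [PySem.List.foldl_append_singleton_eq_map, List.nil_append]
  show (PySem.Str.rstrip _).toList = (String.ofList ((b.reverse.foldl pvStepB []).reverse)).toList
  rw [PySem.Str.toList_rstrip, pvJoin_singletons, pvFoldB_eq]
  unfold PySem.Chars.rstrip
  rw [← List.map_reverse, List.dropWhile_map]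
  have hp : (PySem.Chars.isspace ∘ pvCls) = pvBlank := funext pvIsspace_pvCls
  rw [hp]
  simp
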